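-- pv_equiv track=rewrite | github.com/AFK2020/Assignment1 | programming_q1/q11.py | Alphabet_soup
-- ===== SOURCE A (Python) =====
-- def Alphabet_soup(string):
--     longest=0
--     punctuations_numbers = '''!()-[]{};:'"\,<>./?@#$%^&*_~0123456789'''
--
--
--     for x in string:        #this for loop is to replace punctuations and numbers
--         if x in punctuations_numbers:
--             string = string.replace(x, "")
--
--     sorted_list=list(string)
--
--     for i in range(len(sorted_list)):
--         for j in range(i+1,len(sorted_list)):
--             if sorted_list[i]>sorted_list[j]:
--                 sorted_list[i], sorted_list[j] = sorted_list[j],sorted_list[i]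
--
--
--     sorted_string= "".join(sorted_list)
--     return sorted_string
-- ===== SOURCE B (Python) =====
-- def Alphabet_soup(string):
--     punctuations_numbers = '''!()-[]{};:'"\,<>./?@#$%^&*_~0123456789'''
--     bad = set(punctuations_numbers)
--     counts = {}
--     for c in string:
--         if c not in bad:
--             counts[c] = counts.get(c, 0) + 1
--     if not counts:
--         return ""
--     ords = [ord(c) for c in counts]
--     lo = min(ords)
--     hi = max(ords)
--     parts = []
--     for o in range(lo, hi + 1):
--         parts.append(chr(o) * counts.get(chr(o), 0))
--     return "".join(parts)
-- ===== Notes on version B (the rewrite author's own statement) =====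
-- stated objective: faster
-- what changed: Replaces A's per-character str.replace passes and O(n^2) compare-and-swap sort by a single filtering/counting pass over the string (frequency dict) whose result is emitted in ascending character-ordinal order (counting sort).
import Mathlib
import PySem

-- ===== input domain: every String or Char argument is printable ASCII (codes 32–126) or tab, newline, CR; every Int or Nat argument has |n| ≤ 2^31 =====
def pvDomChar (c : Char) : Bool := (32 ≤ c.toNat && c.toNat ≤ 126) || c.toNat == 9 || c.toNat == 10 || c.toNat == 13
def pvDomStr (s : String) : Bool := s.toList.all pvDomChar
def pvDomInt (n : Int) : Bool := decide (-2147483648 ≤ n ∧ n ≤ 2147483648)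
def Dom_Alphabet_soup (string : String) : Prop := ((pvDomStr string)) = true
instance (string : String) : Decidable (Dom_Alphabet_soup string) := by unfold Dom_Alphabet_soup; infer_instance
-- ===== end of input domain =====

-- B replaces A's repeated str.replace passes and O(n^2) swap sort by one counting pass
-- (frequency dict) emitted in ascending character-ordinal order (faster).

-- ===== PORT A =====
def pvPunct : List Char := "!()-[]{};:'\"\\,<>./?@#$%^&*_~0123456789".toList

-- inner loop body: compare-and-swap of positions i and j
def pvSwap (i : Nat) (l : List Char) (j : Nat) : List Char :=
  if l.getD j 'a' < l.getD i 'a' then (l.set i (l.getD j 'a')).set j (l.getD i 'a') else l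

-- one outer iteration of A's sorting loop
def pvInner (n : Nat) (l : List Char) (i : Nat) : List Char :=
  (List.range' (i + 1) (n - (i + 1))).foldl (pvSwap i) l

def Alphabet_soup (string : String) : String :=
  -- for x in string: if x in punctuations_numbers: string = string.replace(x, "")
  let s1 : List Char := string.toList.foldl
    (fun s x => if PySem.Chars.isIn [x] pvPunct then PySem.Chars.replace s [x] [] else s)
    string.toList
  let n := s1.length
  -- the two nested index loops with the conditional in-place swap
  let sortedList := (List.range n).foldl (pvInner n) s1
  String.mk sortedList

-- ===== PORT B =====
def pvBad : PySem.Set Char := PySem.Set.ofList pvPunct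

def Alphabet_soup_alt (string : String) : String :=
  -- counting pass: counts[c] = counts.get(c, 0) + 1 for c not in bad
  let counts : PySem.Dict Char Int := string.toList.foldl
    (fun d c => if !(PySem.Set.contains pvBad c) then d.insert c (d.getD c 0 + 1) else d)
    PySem.Dict.empty
  if counts.items = [] then "" else
    let ords : List Int := counts.keys.map (fun c => (c.toNat : Int))
    match PySem.List.min? ords (fun x => x), PySem.List.max? ords (fun x => x) with
    | some lo, some hi =>
        let parts : List (List Char) := (PySem.List.pyRange lo (hi + 1) 1).foldl
          (fun acc o => acc ++ [PySem.List.pyRepeat [Char.ofNat o.toNat]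
                                  (counts.getD (Char.ofNat o.toNat) 0)]) []
        String.mk (PySem.Chars.join [] parts)
    | _, _ => ""   -- unreachable: a nonempty dict has a min and a max

-- ===== PRECONDITION & SPEC =====
def Spec_Alphabet_soup (string : String) (out : String) : Prop := out = Alphabet_soup_alt string
instance (string : String) (out : String) : Decidable (Spec_Alphabet_soup string out) := by unfold Spec_Alphabet_soup; infer_instance

-- ===== CLAIM (what is proved, stated in full; the proofs are below) =====
def Claim_equal_Alphabet_soup : Prop := ∀ (string : String), Dom_Alphabet_soup string → Spec_Alphabet_soup string (Alphabet_soup string)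

-- ===== LEMMAS AND PROOFS =====

-- the filtered character sequence both programs keep
def pvF (cs : List Char) : List Char := cs.filter (fun c => decide (c ∉ pvPunct))

theorem pv_replace_go_eq (x : Char) :
    ∀ (fuel : Nat) (l acc : List Char), l.length ≤ fuel →
      PySem.Chars.replace.go [x] [] fuel l acc = acc.reverse ++ l.filter (fun c => !(c == x)) := by
  intro fuel
  induction fuel with
  | zero =>
    intro l acc h
    have hl : l = [] := by cases l <;> simp_all
    subst hl
    simp [PySem.Chars.replace.go]
  | succ n ih =>
    intro l acc h
    cases l with
    | nil => simp [PySem.Chars.replace.go]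
    | cons c t =>
      simp only [PySem.Chars.replace.go, List.isPrefixOf, List.filter]
      by_cases hc : x = c
      · subst hc
        simp only [beq_self_eq_true, Bool.true_and, if_true]
        simp only [List.length_singleton, List.drop_succ_cons, List.drop_zero,
          List.reverse_nil, List.nil_append]
        rw [ih t acc (by simpa using Nat.le_of_succ_le_succ h)]
        simp
      · have hbc : (x == c) = false := by simp [hc]
        simp only [hbc, Bool.false_and, if_false]
        rw [ih t (c :: acc) (by simpa using Nat.le_of_succ_le_succ h)]
        have hcx : (c == x) = false := by simp [Ne.symm hc]
        simp [hcx]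

theorem pv_replace_single (x : Char) (s : List Char) :
    PySem.Chars.replace s [x] [] = s.filter (fun c => !(c == x)) := by
  simp only [PySem.Chars.replace]
  rw [if_neg (by simp)]
  simpa using pv_replace_go_eq x s.length s [] le_rfl

theorem pv_isIn_singleton (x : Char) (l : List Char) :
    PySem.Chars.isIn [x] l = true ↔ x ∈ l := by
  rw [PySem.Chars.isIn_iff_infix]
  constructor
  · exact fun h => h.subset (List.mem_singleton_self x)
  · intro h
    obtain ⟨s, t, rfl⟩ := List.append_of_mem h
    exact ⟨s, t, by simp⟩

theorem pv_phase1_aux : ∀ (xs s : List Char),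
    xs.foldl (fun s x => if PySem.Chars.isIn [x] pvPunct then PySem.Chars.replace s [x] [] else s) s
      = s.filter (fun c => decide (c ∉ pvPunct ∨ c ∉ xs)) := by
  intro xs
  induction xs with
  | nil => intro s; simp
  | cons x xs ih =>
    intro s
    simp only [List.foldl_cons]
    by_cases hx : x ∈ pvPunct
    · rw [if_pos ((pv_isIn_singleton x pvPunct).mpr hx), pv_replace_single, ih,
        List.filter_filter]
      apply List.filter_congr
      intro c _
      by_cases hc : c = x
      · subst hc; simp [hx]
      · simp [hc]
    · rw [if_neg (by simp [pv_isIn_singleton, hx]), ih]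
      apply List.filter_congr
      intro c _
      by_cases hc : c = x
      · subst hc; simp [hx]
      · simp [hc]

theorem pv_phase1_eq (cs : List Char) :
    cs.foldl (fun s x => if PySem.Chars.isIn [x] pvPunct then PySem.Chars.replace s [x] [] else s) cs
      = pvF cs := by
  rw [pv_phase1_aux]
  exact List.filter_congr (fun c hc => by simp [hc])

theorem pv_getD_set_ne (l : List Char) (i m : Nat) (v d : Char) (h : i ≠ m) :
    (l.set i v).getD m d = l.getD m d := by
  by_cases hm : m < l.length
  · rw [List.getD_eq_getElem _ _ (by simpa using hm), List.getD_eq_getElem _ _ hm,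
      List.getElem_set, if_neg h]
  · rw [List.getD_eq_default _ _ (by simp; omega), List.getD_eq_default _ _ (by omega)]

theorem pv_getD_set_self (l : List Char) (i : Nat) (v d : Char) (h : i < l.length) :
    (l.set i v).getD i d = v := by
  rw [List.getD_eq_getElem _ _ (by simpa using h), List.getElem_set, if_pos rfl]

theorem pv_set_set_perm (l : List Char) (i j : Nat) (hij : i < j) (hj : j < l.length) :
    ((l.set i (l.getD j 'a')).set j (l.getD i 'a')).Perm l := by
  have hi : i < l.length := lt_trans hij hj
  rw [List.getD_eq_getElem l 'a' hi, List.getD_eq_getElem l 'a' hj]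
  have hk : j - i - 1 < (l.drop (i + 1)).length := by simp [List.length_drop]; omega
  have hidx : i + 1 + (j - i - 1) = j := by omega
  have hYj : (l.drop (i + 1))[j - i - 1]'hk = l[j]'hj := by
    simp only [List.getElem_drop]
    simp only [hidx]
  have hset1 : l.set i (l[j]'hj) = l.take i ++ l[j]'hj :: l.drop (i + 1) := by
    rw [List.set_eq_take_append_cons_drop, if_pos hi]
  have hTlen : (l.take i).length = i := List.length_take_of_le (le_of_lt hi)
  have hstep : (l.take i ++ l[j]'hj :: l.drop (i + 1)).set j (l[i]'hi)
      = l.take i ++ l[j]'hj :: (l.drop (i + 1)).set (j - i - 1) (l[i]'hi) := by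
    rw [List.set_append_right _ _ (by omega)]
    congr 1
    rw [hTlen]
    generalize hg : j - i - 1 = k
    rw [show j - i = k + 1 by omega, List.set_cons_succ]
  have hYset : (l.drop (i + 1)).set (j - i - 1) (l[i]'hi)
      = (l.drop (i + 1)).take (j - i - 1) ++ l[i]'hi :: (l.drop (i + 1)).drop (j - i) := by
    rw [List.set_eq_take_append_cons_drop, if_pos hk, show j - i - 1 + 1 = j - i by omega]
  have hYsplit : l.drop (i + 1)
      = (l.drop (i + 1)).take (j - i - 1) ++ l[j]'hj :: (l.drop (i + 1)).drop (j - i) := by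
    conv_lhs => rw [← List.take_append_drop (j - i - 1) (l.drop (i + 1))]
    congr 1
    rw [List.drop_eq_getElem_cons hk, hYj, show j - i - 1 + 1 = j - i by omega]
  have hl : l = l.take i ++ l[i]'hi :: l.drop (i + 1) := by
    conv_lhs => rw [← List.take_append_drop i l]
    congr 1
    rw [List.drop_eq_getElem_cons hi]
  rw [hset1, hstep, hYset]
  conv_rhs => rw [hl, hYsplit]
  apply List.Perm.append_left
  exact (List.Perm.cons _ List.perm_middle).trans
    ((List.Perm.swap _ _ _).trans (List.Perm.cons _ List.perm_middle.symm))

theorem pvSwap_perm (i j : Nat) (l : List Char) (hij : i < j) (hj : j < l.length) :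
    (pvSwap i l j).Perm l := by
  unfold pvSwap
  split
  · exact pv_set_set_perm l i j hij hj
  · exact List.Perm.refl l

theorem pvSwap_length (i : Nat) (l : List Char) (j : Nat) : (pvSwap i l j).length = l.length := by
  unfold pvSwap; split <;> simp

theorem pvSwap_untouched (i j : Nat) (l : List Char) (m : Nat) (hmi : m ≠ i) (hmj : m ≠ j) :
    (pvSwap i l j).getD m 'a' = l.getD m 'a' := by
  unfold pvSwap
  split
  · rw [pv_getD_set_ne _ _ _ _ _ (Ne.symm hmj), pv_getD_set_ne _ _ _ _ _ (Ne.symm hmi)]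
  · rfl

theorem pvSwap_le_left (i j : Nat) (l : List Char) (hij : i < j) (hj : j < l.length) :
    (pvSwap i l j).getD i 'a' ≤ l.getD i 'a' := by
  have hi : i < l.length := lt_trans hij hj
  unfold pvSwap
  split
  case isTrue h =>
    rw [pv_getD_set_ne _ _ _ _ _ (by omega : j ≠ i), pv_getD_set_self _ _ _ _ hi]
    exact le_of_lt h
  case isFalse h => exact le_refl _

theorem pvSwap_le_right (i j : Nat) (l : List Char) (hij : i < j) (hj : j < l.length) :
    (pvSwap i l j).getD i 'a' ≤ (pvSwap i l j).getD j 'a' := by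
  have hi : i < l.length := lt_trans hij hj
  unfold pvSwap
  split
  case isTrue h =>
    rw [pv_getD_set_ne _ _ _ _ _ (by omega : j ≠ i), pv_getD_set_self _ _ _ _ hi,
      pv_getD_set_self _ _ _ _ (by simpa using hj)]
    exact le_of_lt h
  case isFalse h => exact le_of_not_gt h

theorem pv_inner_fold (i : Nat) :
    ∀ (js : List Nat) (l : List Char), js.Nodup → (∀ j ∈ js, i < j ∧ j < l.length) → i < l.length →
      (js.foldl (pvSwap i) l).length = l.length ∧
      (js.foldl (pvSwap i) l).Perm l ∧
      (∀ m, m ≠ i → m ∉ js → (js.foldl (pvSwap i) l).getD m 'a' = l.getD m 'a') ∧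
      (js.foldl (pvSwap i) l).getD i 'a' ≤ l.getD i 'a' ∧
      (∀ j ∈ js, (js.foldl (pvSwap i) l).getD i 'a' ≤ (js.foldl (pvSwap i) l).getD j 'a') := by
  intro js
  induction js with
  | nil =>
    intro l _ _ _
    exact ⟨rfl, List.Perm.refl l, fun m _ _ => rfl, le_refl _, by simp⟩
  | cons j js ih =>
    intro l hnd hb hi
    obtain ⟨hij, hjl⟩ := hb j (List.mem_cons_self)
    have hnd' : js.Nodup := (List.nodup_cons.mp hnd).2
    have hjnot : j ∉ js := (List.nodup_cons.mp hnd).1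
    have hlen1 : (pvSwap i l j).length = l.length := pvSwap_length i l j
    have hb' : ∀ j' ∈ js, i < j' ∧ j' < (pvSwap i l j).length := by
      intro j' hj'
      rw [hlen1]
      exact hb j' (List.mem_cons_of_mem _ hj')
    obtain ⟨L2len, L2perm, L2untouched, L2dec, L2min⟩ :=
      ih (pvSwap i l j) hnd' hb' (by rw [hlen1]; exact hi)
    simp only [List.foldl_cons]
    refine ⟨L2len.trans hlen1, L2perm.trans (pvSwap_perm i j l hij hjl), ?_, ?_, ?_⟩
    · intro m hmi hmem
      rw [L2untouched m hmi (fun h => hmem (List.mem_cons_of_mem _ h)),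
        pvSwap_untouched i j l m hmi (fun h => hmem (h ▸ List.mem_cons_self))]
    · exact L2dec.trans (pvSwap_le_left i j l hij hjl)
    · intro j' hj'
      rcases List.mem_cons.mp hj' with h | h
      · subst h
        have e1 : (js.foldl (pvSwap i) (pvSwap i l j')).getD j' 'a' = (pvSwap i l j').getD j' 'a' :=
          L2untouched j' (by omega) hjnot
        rw [e1]
        exact L2dec.trans (pvSwap_le_right i j' l hij hjl)
      · exact L2min j' h

def pvInv (k : Nat) (l : List Char) : Prop :=
  (l.take k).Pairwise (· ≤ ·) ∧ ∀ x ∈ l.take k, ∀ y ∈ l.drop k, x ≤ y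

theorem pv_outer_fold (n : Nat) :
    ∀ (c k : Nat) (l : List Char), k + c = n → l.length = n → pvInv k l →
      ((List.range' k c).foldl (pvInner n) l).Perm l ∧
      ((List.range' k c).foldl (pvInner n) l).Pairwise (· ≤ ·) := by
  intro c
  induction c with
  | zero =>
    intro k l hk hlen hinv
    simp only [List.range'_zero, List.foldl_nil]
    refine ⟨List.Perm.refl l, ?_⟩
    have : l.take k = l := List.take_of_length_le (by omega)
    simpa [this] using hinv.1
  | succ c ih =>
    intro k l hk hlen hinv
    have hkl : k < l.length := by omega
    have hc : n - (k + 1) = c := by omega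
    simp only [List.range'_succ, List.foldl_cons]
    have hjs : ∀ j ∈ List.range' (k + 1) c, k < j ∧ j < l.length := by
      intro j hj
      rw [List.mem_range'_1] at hj
      omega
    obtain ⟨H1len, H1perm, H1unt, H1dec, H1min⟩ :=
      pv_inner_fold k (List.range' (k + 1) c) l (List.nodup_range') hjs hkl
    have hInner : pvInner n l k = (List.range' (k + 1) c).foldl (pvSwap k) l := by
      rw [pvInner, hc]
    set l₁ := (List.range' (k + 1) c).foldl (pvSwap k) l with hl₁
    have hk1 : k < l₁.length := by omega
    have htake : l₁.take k = l.take k := by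
      apply List.ext_getElem
      · simp [H1len]
      · intro m h₁ h₂
        have hm : m < k := by simp at h₁; omega
        have := H1unt m (by omega) (by rw [List.mem_range'_1]; omega)
        rw [List.getElem_take, List.getElem_take]
        rw [List.getD_eq_getElem l₁ 'a' (by omega), List.getD_eq_getElem l 'a' (by omega)] at this
        exact this
    have hdropperm : (l₁.drop k).Perm (l.drop k) := by
      have h1 : (l₁.take k ++ l₁.drop k).Perm (l.take k ++ l.drop k) := by
        rw [List.take_append_drop, List.take_append_drop]; exact H1perm
      rw [htake, List.perm_append_left_iff] at h1
      exact h1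
    have hmemk : l₁[k]'hk1 ∈ l.drop k := by
      have : l₁[k]'hk1 ∈ l₁.drop k := by
        rw [List.drop_eq_getElem_cons hk1]; exact List.mem_cons_self
      exact hdropperm.mem_iff.mp this
    have htake1 : l₁.take (k + 1) = l.take k ++ [l₁[k]'hk1] := by
      rw [List.take_succ, ← htake]
      simp [List.getElem?_eq_getElem hk1]
    have hinv1 : pvInv (k + 1) l₁ := by
      constructor
      · rw [htake1, List.pairwise_append]
        refine ⟨hinv.1, by simp, ?_⟩
        intro a ha b hb
        rw [List.mem_singleton] at hb
        subst hb
        exact hinv.2 a ha _ hmemk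
      · intro x hx y hy
        obtain ⟨m, hm, hym⟩ := List.mem_iff_getElem.mp hy
        have hjm : k + 1 + m < l₁.length := by simp [List.length_drop] at hm; omega
        have hy' : y = l₁[k + 1 + m]'hjm := by rw [← hym, List.getElem_drop]
        have hjmem : (k + 1 + m) ∈ List.range' (k + 1) c := by
          rw [List.mem_range'_1]; omega
        have hky : l₁.getD k 'a' ≤ l₁.getD (k + 1 + m) 'a' := H1min _ hjmem
        rw [List.getD_eq_getElem l₁ 'a' hk1, List.getD_eq_getElem l₁ 'a' hjm] at hky
        rw [htake1] at hx
        rcases List.mem_append.mp hx with hx | hx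
        · -- x in the already-sorted prefix
          have hyk : y ∈ l₁.drop k := by
            rw [List.drop_eq_getElem_cons hk1]
            exact List.mem_cons_of_mem _ hy
          exact hinv.2 x hx y (hdropperm.mem_iff.mp hyk)
        · rw [List.mem_singleton] at hx
          subst hx
          rw [hy']
          exact hky
    have hfinal := ih (k + 1) l₁ (by omega) (by omega) hinv1
    rw [hInner]
    exact ⟨hfinal.1.trans H1perm, hfinal.2⟩

theorem pv_A_sorted (s1 : List Char) :
    ((List.range s1.length).foldl (pvInner s1.length) s1).Perm s1 ∧
    ((List.range s1.length).foldl (pvInner s1.length) s1).Pairwise (· ≤ ·) := by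
  rw [List.range_eq_range']
  exact pv_outer_fold s1.length s1.length 0 s1 (by omega) rfl ⟨by simp, by simp⟩

theorem pv_counts_eq (cs : List Char) :
    cs.foldl (fun d c => if !(PySem.Set.contains pvBad c) then d.insert c (d.getD c 0 + 1) else d)
      PySem.Dict.empty = PySem.Dict.counter (pvF cs) := by
  have h := PySem.List.foldl_if_eq_foldl_filter (fun c => !(PySem.Set.contains pvBad c))
    (fun (d : PySem.Dict Char Int) c => d.insert c (d.getD c 0 + 1)) cs PySem.Dict.empty
  rw [h, PySem.Dict.foldl_insert_getD_add_one_eq_counter]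
  congr 1
  apply List.filter_congr
  intro c _
  by_cases hc : c ∈ pvPunct
  · simp [pvBad, PySem.Set.contains_iff, PySem.Set.mem_ofList, hc]
  · simp [pvBad, PySem.Set.contains_iff, PySem.Set.mem_ofList, hc]

theorem pv_toNat_ofNat (n : Nat) (h : n < 55296) : (Char.ofNat n).toNat = n := by
  simp [Char.ofNat, Nat.isValidChar, Char.toNat, h, Char.ofNatAux]

theorem pv_chr_mono (o1 o2 : Int) (_h0 : 0 ≤ o1) (h12 : o1 ≤ o2) (h2 : o2 ≤ 126) :
    Char.ofNat o1.toNat ≤ Char.ofNat o2.toNat := by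
  rw [Char.le_def, UInt32.le_iff_toNat_le]
  show (Char.ofNat o1.toNat).toNat ≤ (Char.ofNat o2.toNat).toNat
  rw [pv_toNat_ofNat _ (by omega), pv_toNat_ofNat _ (by omega)]
  omega

theorem pv_sum_map_ite (l : List Int) (p : Int → Bool) (K : Nat) :
    (l.map (fun o => if p o then K else 0)).sum = K * l.countP p := by
  induction l with
  | nil => simp
  | cons o l ih =>
    by_cases h : p o
    · simp [h, ih, List.countP_cons, Nat.mul_add, Nat.add_comm]
    · simp [h, ih, List.countP_cons]

theorem pv_join_flatten : ∀ (parts : List (List Char)), PySem.Chars.join [] parts = parts.flatten := by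
  intro parts
  induction parts with
  | nil => simp [PySem.Chars.join_nil]
  | cons a rest ih =>
    cases rest with
    | nil => simp [PySem.Chars.join_singleton]
    | cons b rest' =>
      rw [PySem.Chars.join_cons_cons, ih]
      simp

theorem pv_B_sorted_perm (F : List Char) (hdomF : ∀ c ∈ F, c.toNat ≤ 126) (lo hi : Int)
    (hlo : PySem.List.min? ((PySem.Set.ofList F).map (fun c => (c.toNat : Int))) (fun x => x) = some lo)
    (hhi : PySem.List.max? ((PySem.Set.ofList F).map (fun c => (c.toNat : Int))) (fun x => x) = some hi) :
    ((PySem.List.pyRange lo (hi + 1) 1).map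
        (fun o => List.replicate (F.count (Char.ofNat o.toNat)) (Char.ofNat o.toNat))).flatten.Pairwise (· ≤ ·) ∧
    ((PySem.List.pyRange lo (hi + 1) 1).map
        (fun o => List.replicate (F.count (Char.ofNat o.toNat)) (Char.ofNat o.toNat))).flatten.Perm F := by
  have hords : ∀ x ∈ (PySem.Set.ofList F).map (fun c => (c.toNat : Int)), 0 ≤ x ∧ x ≤ 126 := by
    intro x hx
    obtain ⟨c, hc, rfl⟩ := List.mem_map.mp hx
    have := hdomF c ((PySem.Set.mem_ofList F c).mp hc)
    omega
  have hlob := hords lo (PySem.List.min?_mem hlo)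
  have hhib := hords hi (PySem.List.max?_mem hhi)
  have hRb : ∀ o ∈ PySem.List.pyRange lo (hi + 1) 1, 0 ≤ o ∧ o ≤ 126 := by
    intro o ho
    rw [PySem.List.mem_pyRange_one] at ho
    omega
  constructor
  · -- sorted
    rw [List.pairwise_flatten]
    constructor
    · intro l hl
      obtain ⟨o, _, rfl⟩ := List.mem_map.mp hl
      exact List.pairwise_replicate.mpr (Or.inr (le_refl _))
    · rw [List.pairwise_map]
      refine (PySem.List.pairwise_lt_pyRange_one lo (hi + 1)).imp_of_mem ?_
      intro o1 o2 h1 h2 hlt x hx y hy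
      rw [List.eq_of_mem_replicate hx, List.eq_of_mem_replicate hy]
      exact pv_chr_mono o1 o2 (hRb o1 h1).1 (le_of_lt hlt) (hRb o2 h2).2
  · -- permutation
    rw [List.perm_iff_count]
    intro c
    rw [List.count_flatten, List.map_map]
    have hcongr : ∀ o ∈ PySem.List.pyRange lo (hi + 1) 1,
        (List.count c ∘ fun o => List.replicate (F.count (Char.ofNat o.toNat)) (Char.ofNat o.toNat)) o
          = (fun o => if (o == (c.toNat : Int)) then F.count c else 0) o := by
      intro o ho
      obtain ⟨ho0, ho126⟩ := hRb o ho
      simp only [Function.comp_apply, List.count_replicate]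
      by_cases hoc : Char.ofNat o.toNat = c
      · have h1 : (Char.ofNat o.toNat == c) = true := by simp [hoc]
        have h2 : o = (c.toNat : Int) := by
          have := pv_toNat_ofNat o.toNat (by omega)
          rw [hoc] at this
          omega
        simp [h1, hoc, h2]
      · have h1 : (Char.ofNat o.toNat == c) = false := by simp [hoc]
        have h2 : ¬(o = (c.toNat : Int)) := by
          intro h
          apply hoc
          rw [h]
          simp [Char.ofNat_toNat]
        simp [h1, h2]
    rw [List.map_congr_left hcongr, pv_sum_map_ite _ (fun o => o == (c.toNat : Int)) (F.count c)]
    have hcountP : List.countP (fun o => o == (c.toNat : Int)) (PySem.List.pyRange lo (hi + 1) 1)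
        = List.count ((c.toNat : Int)) (PySem.List.pyRange lo (hi + 1) 1) := rfl
    rw [hcountP]
    by_cases hcF : c ∈ F
    · have hco : (c.toNat : Int) ∈ (PySem.Set.ofList F).map (fun c => (c.toNat : Int)) :=
        List.mem_map.mpr ⟨c, (PySem.Set.mem_ofList F c).mpr hcF, rfl⟩
      have h1 : lo ≤ (c.toNat : Int) := PySem.List.min?_isMin hlo _ hco
      have h2 : ((c.toNat : Int)) ≤ hi := PySem.List.max?_isMax hhi _ hco
      have hmemR : (c.toNat : Int) ∈ PySem.List.pyRange lo (hi + 1) 1 := by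
        rw [PySem.List.mem_pyRange_one]; omega
      rw [List.count_eq_one_of_mem (PySem.List.nodup_pyRange_one _ _) hmemR, Nat.mul_one]
    · rw [List.count_eq_zero_of_not_mem hcF]
      simp

theorem pv_main (string : String) (hdom : Dom_Alphabet_soup string) :
    Alphabet_soup string = Alphabet_soup_alt string := by
  simp only [Alphabet_soup, Alphabet_soup_alt]
  rw [pv_phase1_eq, pv_counts_eq]
  simp only [Dom_Alphabet_soup, pvDomStr] at hdom
  have hdomF : ∀ c ∈ pvF string.toList, c.toNat ≤ 126 := by
    intro c hc
    have hc' : c ∈ string.toList := List.mem_of_mem_filter hc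
    have hall := List.all_eq_true.mp hdom c hc'
    simp only [pvDomChar, Bool.or_eq_true, Bool.and_eq_true, decide_eq_true_eq,
      beq_iff_eq] at hall
    omega
  by_cases hF : pvF string.toList = []
  · rw [hF]
    simp only [PySem.Dict.counter, List.foldl_nil, List.range_zero, List.length_nil]
    rfl
  · obtain ⟨hApm, hAsort⟩ := pv_A_sorted (pvF string.toList)
    obtain ⟨x, hx⟩ := List.exists_mem_of_ne_nil _ hF
    have hof : PySem.Set.ofList (pvF string.toList) ≠ [] :=
      List.ne_nil_of_mem ((PySem.Set.mem_ofList _ x).mpr hx)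
    have hitems : (PySem.Dict.counter (pvF string.toList)).items ≠ [] := by
      rw [PySem.Dict.items_counter]
      simpa using hof
    rw [if_neg hitems, PySem.Dict.keys_counter]
    have hords : (PySem.Set.ofList (pvF string.toList)).map (fun c => (c.toNat : Int)) ≠ [] := by
      simpa using hof
    obtain ⟨lo, hlo⟩ : ∃ lo, PySem.List.min? ((PySem.Set.ofList (pvF string.toList)).map (fun c => (c.toNat : Int))) (fun x => x) = some lo := by
      cases h : PySem.List.min? ((PySem.Set.ofList (pvF string.toList)).map (fun c => (c.toNat : Int))) (fun x => x) with
      | none => exact absurd ((PySem.List.min?_eq_none_iff _ _).mp h) hords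
      | some lo => exact ⟨lo, rfl⟩
    obtain ⟨hi, hhi⟩ : ∃ hi, PySem.List.max? ((PySem.Set.ofList (pvF string.toList)).map (fun c => (c.toNat : Int))) (fun x => x) = some hi := by
      cases h : PySem.List.max? ((PySem.Set.ofList (pvF string.toList)).map (fun c => (c.toNat : Int))) (fun x => x) with
      | none => exact absurd ((PySem.List.max?_eq_none_iff _ _).mp h) hords
      | some hi => exact ⟨hi, rfl⟩
    rw [hlo, hhi]
    simp only []
    rw [PySem.List.foldl_append_singleton_eq_map, List.nil_append, pv_join_flatten]
    have hmapc : (PySem.List.pyRange lo (hi + 1) 1).map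
        (fun o => PySem.List.pyRepeat [Char.ofNat o.toNat]
          ((PySem.Dict.counter (pvF string.toList)).getD (Char.ofNat o.toNat) 0))
        = (PySem.List.pyRange lo (hi + 1) 1).map
        (fun o => List.replicate ((pvF string.toList).count (Char.ofNat o.toNat)) (Char.ofNat o.toNat)) := by
      apply List.map_congr_left
      intro o _
      rw [PySem.List.pyRepeat_singleton, PySem.Dict.getD_counter, Int.toNat_natCast]
    rw [hmapc]
    obtain ⟨hBsort, hBpm⟩ := pv_B_sorted_perm (pvF string.toList) hdomF lo hi hlo hhi
    congr 1
    exact List.eq_of_perm_of_sorted (fun a b _ _ h1 h2 => le_antisymm h1 h2)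
      hAsort hBsort (hApm.trans hBpm.symm)

-- ===== VERDICT (by name: the statement is the Claim_ definition above) =====
theorem Alphabet_soup_spec : Claim_equal_Alphabet_soup := by
  intro s hd
  unfold Spec_Alphabet_soup
  exact pv_main s hd
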